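-- pv_equiv track=rewrite | github.com/IlyaOrson/alamopy | alamopy/almutils.py | only_contains
-- ===== SOURCE A (Python) =====
-- def only_contains(line, char):
--     """
--     Returns true iff this given non-empty string only contains the given char.
--     Args:
--         line: a string
--         char: a character
--     Returns:
--         True iff the string is not empty and it only contains the given char.
--     Example:
--         ("*****", '*') -> True
--         ("", '*') -> False
--     """
--     line_len = len(line)
--     if line_len == 0:
--         return False
--     for i in range(line_len):
--         curr_char = line[i]
--         if curr_char != char:
--             return False
--     return True
-- ===== SOURCE B (Python) =====
-- def only_contains(line, char):
--     return set(line) == {char}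
-- ===== Notes on version B (the rewrite author's own statement) =====
-- stated objective: idiomatic
-- what changed: Replaces the explicit index loop with early return by a set comparison: the set of distinct characters of line must equal {char}, which also makes the empty-string case fall out automatically.
import Mathlib
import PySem

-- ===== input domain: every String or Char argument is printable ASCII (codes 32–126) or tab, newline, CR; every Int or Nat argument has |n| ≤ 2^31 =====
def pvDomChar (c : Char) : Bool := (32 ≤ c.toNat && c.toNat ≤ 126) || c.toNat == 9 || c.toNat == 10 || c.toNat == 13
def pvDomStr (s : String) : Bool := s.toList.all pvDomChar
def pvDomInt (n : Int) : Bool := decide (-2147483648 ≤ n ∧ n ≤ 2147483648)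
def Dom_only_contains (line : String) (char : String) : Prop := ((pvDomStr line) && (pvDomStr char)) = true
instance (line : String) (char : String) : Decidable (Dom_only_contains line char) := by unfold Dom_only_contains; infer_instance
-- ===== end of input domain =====

-- B replaces A's index loop by a set comparison (set(line) == {char}); objective: idiomatic.

-- ===== PORT A =====
-- the 'for i in range(line_len)' loop with its early 'return False'
def ocLoopA (line : String) (char : String) : List Int → Bool
  | [] => true
  | i :: rest =>
    match PySem.Str.pyGet? line i with
    | none => true  -- unreachable: i drawn from range(len(line))
    | some c => if String.mk [c] ≠ char then false else ocLoopA line char rest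

def only_contains (line : String) (char : String) : Bool :=
  let line_len : Int := PySem.Str.len line
  if line_len = 0 then false
  else ocLoopA line char (PySem.List.pyRange 0 line_len 1)

-- ===== PORT B =====
def only_contains_alt (line : String) (char : String) : Bool :=
  PySem.Set.equal (PySem.Set.ofList (line.toList.map (fun c => String.mk [c])))
    (PySem.Set.ofList [char])

-- ===== PRECONDITION & SPEC =====
def Spec_only_contains (line : String) (char : String) (out : Bool) : Prop := out = only_contains_alt line char
instance (line : String) (char : String) (out : Bool) : Decidable (Spec_only_contains line char out) := by unfold Spec_only_contains; infer_instance

-- ===== CLAIM (what is proved, stated in full; the proofs are below) =====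
def Claim_equal_only_contains : Prop := ∀ (line : String) (char : String), Dom_only_contains line char → Spec_only_contains line char (only_contains line char)

-- ===== LEMMAS AND PROOFS =====

-- A's loop from index k on checks exactly the dropped suffix
lemma ocLoopA_pyRange (line : String) (char : String) (k : Nat) :
    ocLoopA line char (PySem.List.pyRange (k : Int) (line.toList.length : Int) 1)
      = (line.toList.drop k).all (fun c => String.mk [c] == char) := by
  by_cases h : k < line.toList.length
  · rw [PySem.List.pyRange_one_cons (by exact_mod_cast h)]
    have hk : ((k : Int) + 1) = ((k + 1 : Nat) : Int) := by push_cast; ring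
    rw [hk, ocLoopA, PySem.Str.pyGet?_natCast]
    have hget : line.toList[k]? = some line.toList[k] := List.getElem?_eq_getElem h
    have hdrop : line.toList.drop k = line.toList[k] :: line.toList.drop (k + 1) :=
      (List.drop_eq_getElem_cons h)
    rw [hget, hdrop, List.all_cons]
    have ih := ocLoopA_pyRange line char (k + 1)
    by_cases he : String.mk [line.toList[k]] = char
    · simp only [he] at ih ⊢
      simpa using ih
    · simp [he]
  · have hL : line.toList.length = line.length := by simp
    have h1 : PySem.List.pyRange (k : Int) (line.toList.length : Int) 1 = [] := by
      simp [PySem.List.pyRange]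
      intro hlt
      omega
    have h2 : line.toList.drop k = [] := List.drop_eq_nil_of_le (by omega)
    rw [h1, h2, ocLoopA]
    rfl
termination_by line.toList.length - k
decreasing_by
  have hlen : k < line.length := by simpa using h
  omega

lemma A_char (line : String) (char : String) :
    only_contains line char
      = (!line.toList.isEmpty && line.toList.all (fun c => String.mk [c] == char)) := by
  unfold only_contains
  rw [PySem.Str.len_eq]
  by_cases h : line.toList.length = 0
  · rw [if_pos (by exact_mod_cast h)]
    simp [List.length_eq_zero_iff.mp h]
  · rw [if_neg (by exact_mod_cast h)]
    have h0 := ocLoopA_pyRange line char 0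
    rw [Nat.cast_zero, List.drop_zero] at h0
    rw [h0]
    have hne : line.toList.isEmpty = false := by
      simp [List.isEmpty_iff]
      exact fun hh => h (by simp [hh])
    rw [hne]
    simp

-- B's set comparison, characterised: set(xs) == {y} iff xs nonempty and all elements y
lemma set_eq_singleton (xs : List String) (y : String) :
    PySem.Set.equal (PySem.Set.ofList xs) (PySem.Set.ofList [y])
      = (!xs.isEmpty && xs.all (fun x => x == y)) := by
  have hy : PySem.Set.ofList [y] = [y] := rfl
  rw [hy]
  cases xs with
  | nil => rfl
  | cons a l =>
    rw [Bool.eq_iff_iff]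
    simp [PySem.Set.equal, PySem.Set.issubset, PySem.Set.contains, PySem.Set.mem_ofList]
    intro ha _
    exact Or.inl ha.symm

lemma B_char (line : String) (char : String) :
    only_contains_alt line char
      = (!line.toList.isEmpty && line.toList.all (fun c => String.mk [c] == char)) := by
  unfold only_contains_alt
  rw [set_eq_singleton]
  rw [List.all_map, List.isEmpty_map]
  rfl

-- ===== VERDICT (by name: the statement is the Claim_ definition above) =====
theorem only_contains_spec : Claim_equal_only_contains := by
  intro line char _
  unfold Spec_only_contains
  rw [A_char, B_char]
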